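-- pv_equiv track=rewrite | github.com/NiruddeshJatra/DSA-Coding_Ninja_problems | P8 - Replace Each Element Of Array With Its Corresponding Rank.py | replaceWithRank
-- ===== SOURCE A (Python) =====
-- from typing import List
--
-- def replaceWithRank(arr: List[int],n : int) -> List[int]:
--     sortedArr = sorted(set(arr))
--     rankDIct = {}
--
--     for rank, value in enumerate(sortedArr):
--         rankDIct[value] = rank+1
--
--     rankArr = []
--     for i in arr:
--         rankArr.append(rankDIct[i])
--
--     return rankArr
-- ===== SOURCE B (Python) =====
-- def replaceWithRank(arr, n):
--     # sort positions by (value, index), scatter a running dense rank back by position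
--     res = [0] * len(arr)
--     rank = 0
--     prev = None
--     for i, v in sorted(enumerate(arr), key=lambda p: (p[1], p[0])):
--         if v != prev:
--             rank += 1
--             prev = v
--         res[i] = rank
--     return res
-- ===== Notes on version B (the rewrite author's own statement) =====
-- stated objective: alternative
-- what changed: Replaces the sorted-distinct-values + rank-dictionary construction with a sort of (value, index) pairs and a single scatter pass that writes a running dense rank into the result by original position; no set, no dictionary.
import Mathlib
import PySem

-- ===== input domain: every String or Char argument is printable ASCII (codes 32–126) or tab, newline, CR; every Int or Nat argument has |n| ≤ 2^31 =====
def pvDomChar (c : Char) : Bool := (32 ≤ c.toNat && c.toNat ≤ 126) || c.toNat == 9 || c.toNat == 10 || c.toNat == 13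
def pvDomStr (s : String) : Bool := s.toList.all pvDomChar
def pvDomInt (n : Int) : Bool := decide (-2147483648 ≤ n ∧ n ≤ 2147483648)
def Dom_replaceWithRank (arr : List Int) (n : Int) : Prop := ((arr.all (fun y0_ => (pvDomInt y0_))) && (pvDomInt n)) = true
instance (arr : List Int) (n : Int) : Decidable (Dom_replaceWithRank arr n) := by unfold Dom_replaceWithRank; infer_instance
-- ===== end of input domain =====

-- B replaces A's sorted-distinct-values + rank-dictionary with a sort of (value, index)
-- pairs and one scatter pass writing a running dense rank by original position; proved equal.

-- ===== PORT A =====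
-- sortedArr = sorted(set(arr)); rankDIct[value] = rank+1 over enumerate(sortedArr);
-- rankArr appends rankDIct[i] for i in arr.  rankDIct[i] never raises (i ∈ set(arr)),
-- so the lookup is ported as getD (exact here: the key is always present).
def replaceWithRank (arr : List Int) (n : Int) : List Int :=
  let sortedArr := PySem.List.sorted (PySem.Set.ofList arr) (fun x => x) false
  let rankDict : PySem.Dict Int Int :=
    (PySem.List.enumerate sortedArr 0).foldl (fun d p => d.insert p.2 (p.1 + 1)) (PySem.Dict.empty)
  arr.foldl (fun acc i => acc ++ [rankDict.getD i 0]) []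

-- ===== PORT B =====
-- res = [0]*len(arr); for i, v in sorted(enumerate(arr), key=lambda p: (p[1], p[0])):
--   if v != prev: rank += 1; prev = v
--   res[i] = rank
def replaceWithRank_alt (arr : List Int) (n : Int) : List Int :=
  let pairs := PySem.List.sorted2 (PySem.List.enumerate arr 0) (fun p => p.2) (fun p => p.1) false
  let st := pairs.foldl
    (fun (st : List Int × Int × Option Int) p =>
      let rp := if st.2.2 = some p.2 then (st.2.1, st.2.2) else (st.2.1 + 1, some p.2)
      (PySem.List.pySetD st.1 p.1 rp.1, rp.1, rp.2))
    (List.replicate arr.length 0, 0, none)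
  st.1

-- ===== PRECONDITION & SPEC =====
def Spec_replaceWithRank (arr : List Int) (n : Int) (out : List Int) : Prop := out = replaceWithRank_alt arr n
instance (arr : List Int) (n : Int) (out : List Int) : Decidable (Spec_replaceWithRank arr n out) := by unfold Spec_replaceWithRank; infer_instance

-- ===== CLAIM (what is proved, stated in full; the proofs are below) =====
def Claim_equal_replaceWithRank : Prop := ∀ (arr : List Int) (n : Int), Dom_replaceWithRank arr n → Spec_replaceWithRank arr n (replaceWithRank arr n)

-- ===== LEMMAS AND PROOFS =====

-- ---------- A side: the rank dictionary maps x to its index in sorted(set(arr)), +1 ----------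

-- Folding inserts whose keys all differ from x leaves getD x unchanged.
theorem getD_foldl_insert_of_not_mem (ps : List (Int × Int)) (d : PySem.Dict Int Int)
    (x : Int) (h : ∀ p ∈ ps, p.2 ≠ x) :
    (ps.foldl (fun d p => d.insert p.2 (p.1 + 1)) d).getD x 0 = d.getD x 0 := by
  induction ps generalizing d with
  | nil => rfl
  | cons p t ih =>
    simp only [List.foldl_cons]
    rw [ih _ (fun q hq => h q (List.mem_cons_of_mem _ hq)),
      PySem.Dict.getD_insert_of_ne _ _ _ (fun hx => h p (List.mem_cons_self) hx.symm)]

-- The rank dictionary built from enumerate(L, s) maps x ∈ L (L nodup) to s + idxOf x + 1.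
theorem getD_rankDict (L : List Int) (hL : L.Nodup) (x : Int) (hx : x ∈ L)
    (s : Int) (d : PySem.Dict Int Int) :
    ((PySem.List.enumerate L s).foldl (fun d p => d.insert p.2 (p.1 + 1)) d).getD x 0
      = s + (L.idxOf x : Int) + 1 := by
  induction L generalizing s d with
  | nil => cases hx
  | cons y t ih =>
    rw [PySem.List.enumerate_cons, List.foldl_cons]
    by_cases hxy : x = y
    · subst hxy
      have hxt : x ∉ t := (List.nodup_cons.mp hL).1
      rw [getD_foldl_insert_of_not_mem _ _ _ (by
          intro p hp hpx
          exact hxt (by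
            have := PySem.List.map_snd_enumerate t (s + 1)
            have hmem : p.2 ∈ (PySem.List.enumerate t (s + 1)).map (·.2) :=
              List.mem_map_of_mem hp
            rw [this] at hmem; rw [hpx] at hmem; exact hmem))]
      simp [PySem.Dict.getD_insert_self, List.idxOf_cons_self]
    · have hxt : x ∈ t := by cases List.mem_cons.mp hx with
        | inl h => exact absurd h hxy
        | inr h => exact h
      rw [ih (List.nodup_cons.mp hL).2 hxt (s + 1)]
      have : (y :: t).idxOf x = t.idxOf x + 1 := by
        simp [Ne.symm hxy]
      rw [this]; push_cast; ring

-- In a strictly increasing list, #elements ≤ x (x ∈ L) is x's index + 1.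
theorem length_filter_le_of_pairwise (L : List Int) (hL : L.Pairwise (· < ·))
    (x : Int) (hx : x ∈ L) :
    (L.filter (fun v => decide (v ≤ x))).length = L.idxOf x + 1 := by
  induction L with
  | nil => cases hx
  | cons y t ih =>
    have hyt : ∀ z ∈ t, y < z := (List.pairwise_cons.mp hL).1
    by_cases hxy : x = y
    · subst hxy
      have h0 : t.filter (fun v => decide (v ≤ x)) = [] := by
        apply List.filter_eq_nil_iff.mpr
        intro z hz
        simp only [decide_eq_true_eq, not_le]
        exact hyt z hz
      rw [List.filter_cons_of_pos (by simp), h0, List.idxOf_cons_self]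
      simp
    · have hxt : x ∈ t := by cases List.mem_cons.mp hx with
        | inl h => exact absurd h hxy
        | inr h => exact h
      have hyx : y < x := hyt x hxt
      rw [List.filter_cons_of_pos (by simpa using le_of_lt hyx)]
      rw [List.length_cons, ih (List.pairwise_cons.mp hL).2 hxt]
      simp [Ne.symm hxy]

-- ---------- B side: the scatter loop ----------

-- The body of B's fold, named for the proofs (definitionally the lambda in the port).
def stepB (st : List Int × Int × Option Int) (p : Int × Int) : List Int × Int × Option Int :=
  let rp := if st.2.2 = some p.2 then (st.2.1, st.2.2) else (st.2.1 + 1, some p.2)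
  (PySem.List.pySetD st.1 p.1 rp.1, rp.1, rp.2)

-- number of distinct values of vs that are ≤ v
def dle (vs : List Int) (v : Int) : Int := (((vs.toFinset).filter (fun u => u ≤ v)).card : Int)

-- 1 iff the first pair's value equals prev (its step does not increment the rank)
def adj (prev : Option Int) (vs : List Int) : Int :=
  match vs with
  | [] => 0
  | w :: _ => if prev = some w then 1 else 0

theorem pySetD_of_inbounds (xs : List Int) (i : Int) (v : Int)
    (h0 : 0 ≤ i) (h1 : i < (xs.length : Int)) :
    PySem.List.pySetD xs i v = xs.set i.toNat v := by
  unfold PySem.List.pySetD PySem.List.pySet? PySem.List.pyIdx?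
  rw [if_pos h0, if_pos h1]
  rfl

theorem length_foldl_stepB (ps : List (Int × Int)) (res : List Int) (rank : Int) (prev : Option Int)
    (hb : ∀ p ∈ ps, 0 ≤ p.1 ∧ p.1 < (res.length : Int)) :
    (ps.foldl stepB (res, rank, prev)).1.length = res.length := by
  induction ps generalizing res rank prev with
  | nil => rfl
  | cons p t ih =>
    have hp := hb p List.mem_cons_self
    have hlen : (stepB (res, rank, prev) p).1.length = res.length := by
      simp [stepB, pySetD_of_inbounds _ _ _ hp.1 hp.2]
    have := ih (stepB (res, rank, prev) p).1 (stepB (res, rank, prev) p).2.1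
      (stepB (res, rank, prev) p).2.2
      (by intro q hq; rw [hlen]; exact hb q (List.mem_cons_of_mem _ hq))
    rw [List.foldl_cons, ← hlen]
    exact this

theorem dle_head (w : Int) (vs : List Int) (h : ∀ u ∈ vs, w ≤ u) : dle (w :: vs) w = 1 := by
  unfold dle
  have : ((w :: vs).toFinset).filter (fun u => u ≤ w) = {w} := by
    apply Finset.ext
    intro u
    simp only [Finset.mem_filter, List.toFinset_cons, Finset.mem_insert, List.mem_toFinset,
      Finset.mem_singleton, decide_eq_true_eq]
    constructor
    · rintro ⟨h1 | h1, h2⟩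
      · exact h1
      · exact le_antisymm h2 (h u h1)
    · rintro rfl; exact ⟨Or.inl rfl, le_refl _⟩
  rw [this]; simp

theorem dle_cons (w v : Int) (vs : List Int) (hwv : w ≤ v) :
    dle (w :: vs) v = dle vs v + (if w ∈ vs then 0 else 1) := by
  unfold dle
  by_cases hw : w ∈ vs
  · have : (w :: vs).toFinset = vs.toFinset := by
      simp [List.toFinset_cons, Finset.insert_eq_self.mpr (List.mem_toFinset.mpr hw)]
    rw [this]; simp [hw]
  · have : ((w :: vs).toFinset).filter (fun u => u ≤ v)
        = insert w ((vs.toFinset).filter (fun u => u ≤ v)) := by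
      simp only [List.toFinset_cons]
      rw [Finset.filter_insert]
      simp [hwv]
    rw [this, Finset.card_insert_of_notMem (by simp [hw])]
    simp [hw]

theorem head_eq_of_mem_of_le (w : Int) (vs : List Int) (hw : w ∈ vs)
    (hs : vs.Pairwise (· ≤ ·)) (hle : ∀ u ∈ vs, w ≤ u) : vs.head? = some w := by
  cases vs with
  | nil => cases hw
  | cons h t =>
    have h1 : h ≤ w := by
      rcases List.mem_cons.mp hw with rfl | hw'
      · exact le_refl _
      · exact (List.pairwise_cons.mp hs).1 w hw'
    have h2 : w ≤ h := hle h List.mem_cons_self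
    simp [le_antisymm h1 h2]

-- find? over a fst-nodup pair list locates the unique pair with the given first component
theorem find?_fst_eq (ps : List (Int × Int)) (j v : Int)
    (hfst : (ps.map Prod.fst).Nodup) (hmem : (j, v) ∈ ps) :
    ps.find? (fun p => p.1 == j) = some (j, v) := by
  induction ps with
  | nil => cases hmem
  | cons q t ih =>
    have hf' : (q.1 :: t.map Prod.fst).Nodup := by rw [← List.map_cons]; exact hfst
    obtain ⟨hnin, hnd⟩ := List.nodup_cons.mp hf'
    by_cases hq : q.1 = j
    · have : (j, v) = q := by
        rcases List.mem_cons.mp hmem with h | h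
        · exact h
        · exfalso
          have : j ∈ t.map Prod.fst := by
            exact List.mem_map_of_mem (f := Prod.fst) h
          rw [hq] at hnin; exact hnin this
      rw [List.find?_cons_of_pos (by simp [hq]), ← this]
    · have hmem' : (j, v) ∈ t := by
        rcases List.mem_cons.mp hmem with h | h
        · exact absurd (congrArg Prod.fst h).symm hq
        · exact h
      rw [List.find?_cons_of_neg (by simp [hq])]
      exact ih hnd hmem'

-- MAIN invariant of the scatter loop: every written cell holds the dense rank of its value.
theorem scatter_spec (ps : List (Int × Int)) (res : List Int) (rank : Int) (prev : Option Int)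
    (hsort : (ps.map Prod.snd).Pairwise (· ≤ ·))
    (hprev : ∀ w, prev = some w → ∀ p ∈ ps, w ≤ p.2)
    (hfst : (ps.map Prod.fst).Nodup)
    (hb : ∀ p ∈ ps, 0 ≤ p.1 ∧ p.1 < (res.length : Int)) :
    ∀ j : Nat, j < res.length →
      (ps.foldl stepB (res, rank, prev)).1[j]? =
        match ps.find? (fun p => p.1 == (j : Int)) with
        | some p => some (rank + dle (ps.map Prod.snd) p.2 - adj prev (ps.map Prod.snd))
        | none => res[j]? := by
  induction ps generalizing res rank prev with
  | nil => intro j hj; simp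
  | cons p t ih =>
    intro j hj
    have hp := hb p List.mem_cons_self
    have hs' : (p.2 :: t.map Prod.snd).Pairwise (· ≤ ·) := by rw [← List.map_cons]; exact hsort
    obtain ⟨hsh, hst⟩ := List.pairwise_cons.mp hs'
    have hf' : (p.1 :: t.map Prod.fst).Nodup := by rw [← List.map_cons]; exact hfst
    obtain ⟨hfh, hftl⟩ := List.nodup_cons.mp hf'
    -- the step's state
    have hstep : stepB (res, rank, prev) p
        = (res.set p.1.toNat (rank + 1 - adj prev (p.2 :: t.map Prod.snd)),
           rank + 1 - adj prev (p.2 :: t.map Prod.snd), some p.2) := by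
      by_cases hpe : prev = some p.2
      · simp [stepB, hpe, adj, pySetD_of_inbounds _ _ _ hp.1 hp.2]
      · simp [stepB, hpe, adj, pySetD_of_inbounds _ _ _ hp.1 hp.2]
    have hple : ∀ q ∈ t, p.2 ≤ q.2 := by
      intro q hq
      exact hsh q.2 (List.mem_map_of_mem hq)
    have hres' : (res.set p.1.toNat (rank + 1 - adj prev (p.2 :: t.map Prod.snd))).length
        = res.length := by simp
    have ihx := ih (res.set p.1.toNat (rank + 1 - adj prev (p.2 :: t.map Prod.snd)))
      (rank + 1 - adj prev (p.2 :: t.map Prod.snd)) (some p.2)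
      hst
      (by rintro w hw q hq; cases Option.some.inj hw; exact hple q hq)
      hftl
      (by intro q hq; rw [hres']; exact hb q (List.mem_cons_of_mem _ hq))
      j (by simpa using hj)
    rw [List.foldl_cons, hstep]
    rw [show (t.foldl stepB ((res.set p.1.toNat (rank + 1 - adj prev (p.2 :: t.map Prod.snd))),
        rank + 1 - adj prev (p.2 :: t.map Prod.snd), some p.2)).1
      = (t.foldl stepB ((res.set p.1.toNat (rank + 1 - adj prev (p.2 :: t.map Prod.snd)),
        rank + 1 - adj prev (p.2 :: t.map Prod.snd), some p.2))).1 from rfl]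
    rw [ihx]
    by_cases hpj : p.1 = (j : Int)
    · -- this step writes cell j; later steps do not touch it
      have hnone : t.find? (fun q => q.1 == (j : Int)) = none := by
        apply List.find?_eq_none.mpr
        intro q hq
        simp only [beq_iff_eq]
        intro hqj
        have h1 : q.1 ∈ t.map Prod.fst := List.mem_map_of_mem hq
        rw [hqj, ← hpj] at h1
        exact hfh h1
      rw [show List.find? (fun q => q.1 == (j : Int)) (p :: t) = some p from
        List.find?_cons_of_pos (by simp [hpj])]
      simp only [hnone]
      have hj' : p.1.toNat = j := by omega
      rw [hj', List.getElem?_set_self (by exact hj)]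
      have hdh : dle ((p :: t).map Prod.snd) p.2 = 1 := by
        simp only [List.map_cons]
        exact dle_head p.2 (t.map Prod.snd) (by
          intro u hu
          rcases List.mem_map.mp hu with ⟨q, hq, rfl⟩
          exact hple q hq)
      simp only [List.map_cons] at hdh ⊢
      rw [hdh]
    · -- cell j is decided by the tail
      have hfind : (p :: t).find? (fun q => q.1 == (j : Int))
          = t.find? (fun q => q.1 == (j : Int)) := List.find?_cons_of_neg (by simp [hpj])
      rw [hfind]
      cases hft : t.find? (fun q => q.1 == (j : Int)) with
      | none =>
        exact List.getElem?_set_ne (by omega)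
      | some q =>
        -- q came from t, so p.2 ≤ q.2
        have hqt : q ∈ t := List.mem_of_find?_eq_some hft
        have hq2 : p.2 ≤ q.2 := hple q hqt
        -- arithmetic: rank' + dle vs' - adj' = rank + dle vs - adj
        have key : (rank + 1 - adj prev (p.2 :: t.map Prod.snd))
              + dle (t.map Prod.snd) q.2 - adj (some p.2) (t.map Prod.snd)
            = rank + dle ((p :: t).map Prod.snd) q.2 - adj prev ((p :: t).map Prod.snd) := by
          simp only [List.map_cons]
          rw [dle_cons p.2 q.2 (t.map Prod.snd) hq2]
          by_cases hw : p.2 ∈ t.map Prod.snd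
          · have hhead : (t.map Prod.snd).head? = some p.2 := by
              apply head_eq_of_mem_of_le p.2 (t.map Prod.snd) hw
              · exact (List.pairwise_cons.mp (by simpa using hsort)).2
              · intro u hu
                rcases List.mem_map.mp hu with ⟨r, hr, rfl⟩
                exact hple r hr
            have hadj : adj (some p.2) (t.map Prod.snd) = 1 := by
              cases hvt : t.map Prod.snd with
              | nil => rw [hvt] at hhead; cases hhead
              | cons a l =>
                rw [hvt] at hhead
                simp only [List.head?_cons] at hhead
                simp [adj, Option.some.inj hhead]
            rw [hadj]; simp [hw]; ring
          · have hadj : adj (some p.2) (t.map Prod.snd) = 0 := by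
              cases hvt : t.map Prod.snd with
              | nil => simp [adj]
              | cons a l =>
                have hne : a ≠ p.2 := by
                  intro h
                  exact hw (by rw [hvt, ← h]; exact List.mem_cons_self)
                have hne' : ¬ (some p.2 = some a) := by
                  intro h; exact hne (Option.some.inj h).symm
                simp [adj, hne']
            rw [hadj]; simp [hw]; ring
        simp only [List.map_cons] at key
        exact congrArg some key

-- ---------- sortedness of B's pair list ----------

-- insertBy with a comparator deciding a transitive total relation preserves Pairwise
theorem insertBy_pairwise_of (before : Int × Int → Int × Int → Bool)
    (R : Int × Int → Int × Int → Prop)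
    (htrans : ∀ a b c, R a b → R b c → R a c)
    (ht : ∀ a b, before a b = true → R a b)
    (hf : ∀ a b, before a b = false → R b a)
    (x : Int × Int) (ys : List (Int × Int)) (h : ys.Pairwise R) :
    (PySem.List.insertBy before x ys).Pairwise R := by
  induction ys with
  | nil => simp [PySem.List.insertBy]
  | cons y t ih =>
    by_cases hb : before x y = true
    · rw [show PySem.List.insertBy before x (y :: t) = x :: y :: t by
        simp [PySem.List.insertBy, hb]]
      apply List.pairwise_cons.mpr
      refine ⟨?_, h⟩
      intro z hz
      rcases List.mem_cons.mp hz with hzy | hz'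
      · rw [hzy]; exact ht x y hb
      · exact htrans x y z (ht x y hb) ((List.pairwise_cons.mp h).1 z hz')
    · rw [show PySem.List.insertBy before x (y :: t) = y :: PySem.List.insertBy before x t by
        simp [PySem.List.insertBy, hb]]
      apply List.pairwise_cons.mpr
      constructor
      · intro z hz
        rcases (PySem.List.mem_insertBy before x z t).mp hz with hzx | hz'
        · rw [hzx]; exact hf x y (by simpa using hb)
        · exact (List.pairwise_cons.mp h).1 z hz'
      · exact ih (List.pairwise_cons.mp h).2

theorem foldl_insertBy_pairwise_of (before : Int × Int → Int × Int → Bool)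
    (R : Int × Int → Int × Int → Prop)
    (htrans : ∀ a b c, R a b → R b c → R a c)
    (ht : ∀ a b, before a b = true → R a b)
    (hf : ∀ a b, before a b = false → R b a)
    (xs acc : List (Int × Int)) (hacc : acc.Pairwise R) :
    (xs.foldl (fun acc x => PySem.List.insertBy before x acc) acc).Pairwise R := by
  induction xs generalizing acc with
  | nil => exact hacc
  | cons x t ih =>
    exact ih _ (insertBy_pairwise_of before R htrans ht hf x acc hacc)

-- B's pair list is sorted by value (second components pairwise ≤)
theorem pairs_sorted (arr : List Int) :
    ((PySem.List.sorted2 (PySem.List.enumerate arr 0) (fun p => p.2) (fun p => p.1) false).map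
      Prod.snd).Pairwise (· ≤ ·) := by
  apply List.pairwise_map.mpr
  have : PySem.List.sorted2 (PySem.List.enumerate arr 0) (fun p => p.2) (fun p => p.1) false
      = (PySem.List.enumerate arr 0).foldl
        (fun acc x => PySem.List.insertBy
          (fun a b => decide (a.2 < b.2) || !decide (b.2 < a.2) && decide (a.1 < b.1)) x acc) [] := by
    simp [PySem.List.sorted2]
  rw [this]
  apply foldl_insertBy_pairwise_of
  · intro a b c h1 h2; exact le_trans h1 h2
  · intro a b h
    simp only [Bool.or_eq_true, Bool.and_eq_true, Bool.not_eq_true', decide_eq_true_eq,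
      decide_eq_false_iff_not] at h
    rcases h with h | ⟨h, _⟩
    · exact le_of_lt h
    · exact le_of_not_gt h
  · intro a b h
    simp only [Bool.or_eq_false_iff, Bool.and_eq_false_iff, Bool.not_eq_false',
      decide_eq_true_eq, decide_eq_false_iff_not] at h
    exact le_of_not_gt h.1
  · exact List.Pairwise.nil

-- ---------- facts about B's pair list as a permutation of enumerate(arr) ----------

theorem pairs_perm (arr : List Int) :
    (PySem.List.sorted2 (PySem.List.enumerate arr 0) (fun p => p.2) (fun p => p.1) false).Perm
      (PySem.List.enumerate arr 0) :=
  PySem.List.sorted2_perm _ _ _ _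

theorem enum_fst_nodup (arr : List Int) : ((PySem.List.enumerate arr 0).map Prod.fst).Nodup := by
  have hpw := PySem.List.pairwise_lt_enumerate arr 0
  have : ((PySem.List.enumerate arr 0).map Prod.fst).Pairwise (· < ·) :=
    List.pairwise_map.mpr hpw
  exact this.imp (fun h => ne_of_lt h)

theorem mem_enum_bounds (arr : List Int) (p : Int × Int) (hp : p ∈ PySem.List.enumerate arr 0) :
    0 ≤ p.1 ∧ p.1 < (arr.length : Int) := by
  rcases (PySem.List.mem_enumerate_iff arr 0 p).mp hp with ⟨k, hk, rfl⟩
  constructor <;> simp <;> omega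

-- ---------- assembling both sides ----------

-- L := sorted(set(arr)) seen through Finsets: dle arr x = idxOf x L + 1 for x ∈ arr
theorem dle_eq_idxOf (arr : List Int) (x : Int) (hx : x ∈ arr) :
    dle arr x = ((PySem.List.sorted (PySem.Set.ofList arr) (fun x => x) false).idxOf x : Int) + 1 := by
  set L := PySem.List.sorted (PySem.Set.ofList arr) (fun x => x) false with hLdef
  have hpw : L.Pairwise (· < ·) := PySem.List.sorted_ofList_pairwise_lt arr
  have hnd : L.Nodup := hpw.imp (fun h => ne_of_lt h)
  have hmemL : ∀ z, z ∈ L ↔ z ∈ arr := by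
    intro z
    rw [hLdef, PySem.List.mem_sorted, PySem.Set.mem_ofList]
  have hxL : x ∈ L := (hmemL x).mpr hx
  have hfin : L.toFinset = arr.toFinset := by
    apply Finset.ext; intro z
    simp [List.mem_toFinset, hmemL]
  have h1 : dle arr x = ((L.filter (fun v => decide (v ≤ x))).length : Int) := by
    unfold dle
    rw [← hfin, ← List.toFinset_card_of_nodup (hnd.filter (fun v => decide (v ≤ x))),
      List.toFinset_filter]
    norm_num
  rw [h1, length_filter_le_of_pairwise L hpw x hxL]
  push_cast; ring

theorem replaceWithRank_eq_map (arr : List Int) (n : Int) :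
    replaceWithRank arr n = arr.map (fun x =>
      (((PySem.List.enumerate (PySem.List.sorted (PySem.Set.ofList arr) (fun x => x) false) 0).foldl
        (fun d p => d.insert p.2 (p.1 + 1)) (PySem.Dict.empty : PySem.Dict Int Int)).getD x 0)) := by
  unfold replaceWithRank
  rw [PySem.List.foldl_append_singleton_eq_map]
  rfl

-- B's output, cell by cell
theorem alt_getElem? (arr : List Int) (n : Int) (j : Nat) (hj : j < arr.length) :
    (replaceWithRank_alt arr n)[j]? = some (dle arr arr[j]) := by
  unfold replaceWithRank_alt
  set pairs := PySem.List.sorted2 (PySem.List.enumerate arr 0) (fun p => p.2) (fun p => p.1) false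
    with hpairs
  have hperm : pairs.Perm (PySem.List.enumerate arr 0) := pairs_perm arr
  have hfst : (pairs.map Prod.fst).Nodup :=
    ((hperm.map Prod.fst).nodup_iff).mpr (enum_fst_nodup arr)
  have hbd : ∀ p ∈ pairs, 0 ≤ p.1 ∧ p.1 < ((List.replicate arr.length (0:Int)).length : Int) := by
    intro p hp
    have := mem_enum_bounds arr p (hperm.mem_iff.mp hp)
    simpa using this
  have hfold : pairs.foldl
      (fun (st : List Int × Int × Option Int) p =>
        let rp := if st.2.2 = some p.2 then (st.2.1, st.2.2) else (st.2.1 + 1, some p.2)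
        (PySem.List.pySetD st.1 p.1 rp.1, rp.1, rp.2))
      (List.replicate arr.length 0, 0, none)
      = pairs.foldl stepB (List.replicate arr.length 0, 0, none) := rfl
  simp only [hfold]
  have hsc := scatter_spec pairs (List.replicate arr.length 0) 0 none
    (pairs_sorted arr)
    (by intro w hw; cases hw)
    hfst hbd j (by simpa using hj)
  -- the pair (j, arr[j]) is in pairs
  have hmem : ((j : Int), arr[j]) ∈ pairs := by
    apply hperm.mem_iff.mpr
    apply (PySem.List.mem_enumerate_iff arr 0 _).mpr
    exact ⟨j, hj, by simp⟩
  have hfind := find?_fst_eq pairs (j : Int) arr[j] hfst hmem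
  rw [hfind] at hsc
  have hvals : dle (pairs.map Prod.snd) arr[j] = dle arr arr[j] := by
    unfold dle
    have : (pairs.map Prod.snd).toFinset = arr.toFinset := by
      have h1 : (pairs.map Prod.snd).Perm arr := by
        have := hperm.map Prod.snd
        rwa [show (PySem.List.enumerate arr 0).map Prod.snd = arr from
          PySem.List.map_snd_enumerate arr 0] at this
      exact List.toFinset_eq_of_perm _ _ h1
    rw [this]
  have hadj : adj none (pairs.map Prod.snd) = 0 := by
    cases pairs.map Prod.snd with
    | nil => rfl
    | cons a l => simp [adj]
  rw [hsc]
  show some (0 + dle (pairs.map Prod.snd) arr[j] - adj none (pairs.map Prod.snd))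
    = some (dle arr arr[j])
  rw [hvals, hadj]
  norm_num

theorem alt_length (arr : List Int) (n : Int) :
    (replaceWithRank_alt arr n).length = arr.length := by
  unfold replaceWithRank_alt
  set pairs := PySem.List.sorted2 (PySem.List.enumerate arr 0) (fun p => p.2) (fun p => p.1) false
    with hpairs
  have hperm : pairs.Perm (PySem.List.enumerate arr 0) := pairs_perm arr
  have hbd : ∀ p ∈ pairs, 0 ≤ p.1 ∧ p.1 < ((List.replicate arr.length (0:Int)).length : Int) := by
    intro p hp
    have := mem_enum_bounds arr p (hperm.mem_iff.mp hp)
    simpa using this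
  have := length_foldl_stepB pairs (List.replicate arr.length 0) 0 none hbd
  simpa using this

-- ===== VERDICT (by name: the statement is the Claim_ definition above) =====
theorem replaceWithRank_spec : Claim_equal_replaceWithRank := by
  intro arr n _
  unfold Spec_replaceWithRank
  apply List.ext_getElem?
  intro j
  by_cases hj : j < arr.length
  · rw [replaceWithRank_eq_map, alt_getElem? arr n j hj]
    rw [List.getElem?_map, List.getElem?_eq_getElem hj]
    simp only [Option.map_some]
    congr 1
    set L := PySem.List.sorted (PySem.Set.ofList arr) (fun x => x) false with hLdef
    have hpw : L.Pairwise (· < ·) := PySem.List.sorted_ofList_pairwise_lt arr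
    have hnd : L.Nodup := hpw.imp (fun h => ne_of_lt h)
    have hxL : arr[j] ∈ L := by
      rw [hLdef, PySem.List.mem_sorted, PySem.Set.mem_ofList]
      exact List.getElem_mem hj
    rw [getD_rankDict L hnd arr[j] hxL 0 PySem.Dict.empty,
      dle_eq_idxOf arr arr[j] (List.getElem_mem hj)]
    ring
  · have h1 : (replaceWithRank arr n).length = arr.length := by
      rw [replaceWithRank_eq_map]; simp
    rw [List.getElem?_eq_none (by omega : (replaceWithRank arr n).length ≤ j),
      List.getElem?_eq_none (by rw [alt_length]; omega)]
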